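-- pv_equiv track=rewrite | github.com/alemiaschi/nonce-stories | scripts/build_stories_data.py | is_deep_solved
-- ===== SOURCE A (Python) =====
-- def is_deep_solved(story_id: str, story_tree: dict) -> bool:
--     """Recursively check if all nonce word branches are expanded."""
--     story = story_tree.get(story_id)
--     if not story:
--         return False
--     children = story.get("children", {})
--     for lemma, child_id in children.items():
--         if child_id is None:
--             return False
--         if not is_deep_solved(child_id, story_tree):
--             return False
--     return True
-- ===== SOURCE B (Python) =====
-- def is_deep_solved(story_id: str, story_tree: dict) -> bool:
--     """Level-wise reachability closure + one validation pass (no recursion)."""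
--     reach = {story_id}
--     for _ in range(len(story_tree) + 1):
--         new = set(reach)
--         for k in reach:
--             story = story_tree.get(k)
--             if story:
--                 for child in story.get("children", {}).values():
--                     if child is not None:
--                         new.add(child)
--         if new == reach:
--             break
--         reach = new
--     for k in reach:
--         story = story_tree.get(k)
--         if not story:
--             return False
--         for child in story.get("children", {}).values():
--             if child is None:
--                 return False
--     return True
-- ===== Notes on version B (the rewrite author's own statement) =====
-- stated objective: alternative
-- what changed: Replaced A's unbounded recursion over children by an iterative level-wise reachability closure (a set of reachable node ids, expanded until it stops growing) followed by a single validation pass over the closure; B never recurses, visits each shared node once, and returns a value on cyclic trees where A raises RecursionError.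
import Mathlib
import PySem

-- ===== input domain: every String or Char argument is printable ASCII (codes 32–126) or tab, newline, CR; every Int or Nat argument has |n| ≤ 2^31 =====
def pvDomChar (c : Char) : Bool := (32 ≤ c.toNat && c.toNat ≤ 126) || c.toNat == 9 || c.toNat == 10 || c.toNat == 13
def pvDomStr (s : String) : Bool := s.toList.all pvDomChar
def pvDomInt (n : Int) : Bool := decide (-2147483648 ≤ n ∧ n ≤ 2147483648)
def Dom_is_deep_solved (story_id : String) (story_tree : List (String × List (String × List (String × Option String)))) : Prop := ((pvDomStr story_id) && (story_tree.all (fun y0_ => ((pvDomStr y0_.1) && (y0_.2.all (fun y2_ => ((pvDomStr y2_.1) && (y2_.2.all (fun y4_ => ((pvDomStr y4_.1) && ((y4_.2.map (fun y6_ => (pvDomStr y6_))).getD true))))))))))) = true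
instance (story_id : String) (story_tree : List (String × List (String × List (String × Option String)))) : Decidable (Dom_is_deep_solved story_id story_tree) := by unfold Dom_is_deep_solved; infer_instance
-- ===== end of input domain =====

-- B replaces A's unbounded recursion by a level-wise reachability closure plus one validation pass;
-- B agrees with A wherever A returns and also returns a value (instead of RecursionError) on cyclic
-- input. The Lean port of A carries a fuel counter as a totality device only: on Pre_ the fuel is
-- proved sufficient.

-- ===== PORT A =====
-- recursion fuel (totality device; story_tree.length + 2 is proved sufficient on Pre_)
def is_deep_solved_go (story_tree : List (String × List (String × List (String × Option String)))) : Nat → String → Bool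
  | 0, _ => false
  | fuel + 1, story_id =>
    match (PySem.Dict.mk story_tree).get? story_id with
    | none => false                                  -- `if not story` (missing key)
    | some story =>
      if story.isEmpty then false                    -- `if not story` (empty dict is falsy)
      else
        ((PySem.Dict.mk story).getD "children" []).all (fun p =>
          match p.2 with
          | none => false
          | some child_id => is_deep_solved_go story_tree fuel child_id)

def is_deep_solved (story_id : String) (story_tree : List (String × List (String × List (String × Option String)))) : Bool :=
  is_deep_solved_go story_tree (story_tree.length + 2) story_id

-- ===== PORT B =====
-- non-None children ids of a node (empty when the node is missing or its story dict is falsy)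
def pvSucc (story_tree : List (String × List (String × List (String × Option String)))) (k : String) : List String :=
  match (PySem.Dict.mk story_tree).get? k with
  | none => []
  | some story =>
    if story.isEmpty then []
    else ((PySem.Dict.mk story).getD "children" []).filterMap (fun p => p.2)

-- one closure round over an arbitrary successor map: `new = set(reach); for k in reach: … new.add(child)`
def pvRStep (succ : String → List String) (reach : PySem.Set String) : PySem.Set String :=
  reach.foldl (fun acc k => (succ k).foldl PySem.Set.add acc) (PySem.Set.ofList reach)

-- B's closure round uses the child successors
def pvStep (story_tree : List (String × List (String × List (String × Option String)))) (reach : PySem.Set String) : PySem.Set String :=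
  pvRStep (pvSucc story_tree) reach

-- `for _ in range(len(story_tree)+1): … if new == reach: break; reach = new`
def pvBLoop (story_tree : List (String × List (String × List (String × Option String)))) : Nat → PySem.Set String → PySem.Set String
  | 0, reach => reach
  | n + 1, reach =>
    let nw := pvStep story_tree reach
    if PySem.Set.equal nw reach then reach else pvBLoop story_tree n nw

-- final validation pass: node present, story truthy, no None child
def pvGood (story_tree : List (String × List (String × List (String × Option String)))) (k : String) : Bool :=
  match (PySem.Dict.mk story_tree).get? k with
  | none => false
  | some story =>
    !story.isEmpty && ((PySem.Dict.mk story).getD "children" []).all (fun p => p.2.isSome)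

def is_deep_solved_alt (story_id : String) (story_tree : List (String × List (String × List (String × Option String)))) : Bool :=
  (pvBLoop story_tree (story_tree.length + 1) (PySem.Set.ofList [story_id])).all (pvGood story_tree)

-- ===== PRECONDITION & SPEC =====
-- reachability used only to STATE the precondition: nodes at graph distance ≤ n from r
def pvNbhd (succ : String → List String) (r : List String) : List String :=
  PySem.List.dedup (r ++ r.flatMap succ)

def pvReach (succ : String → List String) : Nat → List String → List String
  | 0, r => r
  | n + 1, r => pvReach succ n (pvNbhd succ r)

-- node present with a truthy (non-empty) story
def pvOk (story_tree : List (String × List (String × List (String × Option String)))) (k : String) : Bool :=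
  match (PySem.Dict.mk story_tree).get? k with
  | none => false
  | some story => !story.isEmpty

-- successors A's recursion can actually step through: children up to the first None
-- and up to (and including) the first child whose own node is missing or falsy
def pvSuccR (story_tree : List (String × List (String × List (String × Option String)))) (k : String) : List String :=
  match (PySem.Dict.mk story_tree).get? k with
  | none => []
  | some story =>
    if story.isEmpty then []
    else
      let l1 := (((PySem.Dict.mk story).getD "children" []).takeWhile (fun p => p.2.isSome)).filterMap (fun p => p.2)
      match l1.findIdx? (fun c => !(pvOk story_tree c)) with
      | none => l1
      | some i => l1.take (i + 1)

-- Pre_ excludes inputs on which a chain of steppable links leads from story_id into a cycle of such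
-- links: there A's recursion overflows the stack (RecursionError) unless an earlier branch fails two
-- or more levels down and short-circuits it first, in which case A returns False and B returns False
-- as well (see the cited excluded examples).
def Pre_is_deep_solved (story_id : String) (story_tree : List (String × List (String × List (String × Option String)))) : Prop :=
  ∀ k ∈ pvReach (pvSuccR story_tree) (story_tree.length + 1) [story_id],
    k ∉ pvReach (pvSuccR story_tree) (story_tree.length + 1) (pvSuccR story_tree k)
instance (story_id : String) (story_tree : List (String × List (String × List (String × Option String)))) : Decidable (Pre_is_deep_solved story_id story_tree) := by unfold Pre_is_deep_solved; infer_instance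

def pvWitness_is_deep_solved : String × (List (String × List (String × List (String × Option String)))) :=
  ("a", [("a", [("children", [("x", some "b")])]), ("b", [("children", [])])])

def Spec_is_deep_solved (story_id : String) (story_tree : List (String × List (String × List (String × Option String)))) (out : Bool) : Prop := out = is_deep_solved_alt story_id story_tree
instance (story_id : String) (story_tree : List (String × List (String × List (String × Option String)))) (out : Bool) : Decidable (Spec_is_deep_solved story_id story_tree out) := by unfold Spec_is_deep_solved; infer_instance

-- ===== CLAIM (what is proved, stated in full; the proofs are below) =====
def Claim_equal_is_deep_solved : Prop := ∀ (story_id : String) (story_tree : List (String × List (String × List (String × Option String)))), Dom_is_deep_solved story_id story_tree → Pre_is_deep_solved story_id story_tree → Spec_is_deep_solved story_id story_tree (is_deep_solved story_id story_tree)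

-- ===== LEMMAS AND PROOFS =====

abbrev PvTree := List (String × List (String × List (String × Option String)))

-- pure closure iteration (no break), the proofs' view of B's loop
def pvRIter (succ : String → List String) : Nat → PySem.Set String → PySem.Set String
  | 0, reach => reach
  | n + 1, reach => pvRIter succ n (pvRStep succ reach)

theorem pv_foldl_add_append (l : List String) (acc : PySem.Set String) :
    ∃ t, l.foldl PySem.Set.add acc = acc ++ t := by
  induction l generalizing acc with
  | nil => exact ⟨[], by simp⟩
  | cons x xs ih =>
    simp only [List.foldl_cons]
    rw [PySem.Set.add_eq_ite]
    split_ifs with hx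
    · exact ih acc
    · obtain ⟨t, ht⟩ := ih (acc ++ [x])
      exact ⟨[x] ++ t, by simp [ht]⟩

theorem pv_step_append (succ : String → List String) (r : PySem.Set String) :
    ∃ t, pvRStep succ r = PySem.Set.ofList r ++ t := by
  have gen : ∀ (l : List String) (acc : PySem.Set String),
      ∃ t, l.foldl (fun a k => (succ k).foldl PySem.Set.add a) acc = acc ++ t := by
    intro l
    induction l with
    | nil => exact fun acc => ⟨[], by simp⟩
    | cons x xs ih =>
      intro acc
      obtain ⟨t1, h1⟩ := pv_foldl_add_append (succ x) acc
      obtain ⟨t2, h2⟩ := ih (acc ++ t1)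
      exact ⟨t1 ++ t2, by simp [List.foldl_cons, h1, h2]⟩
  exact gen r (PySem.Set.ofList r)

theorem pv_mem_foldl_add (x : String) (l : List String) (acc : PySem.Set String) :
    x ∈ l.foldl PySem.Set.add acc ↔ x ∈ acc ∨ x ∈ l := by
  simpa using PySem.Set.mem_foldl_add l id acc x

theorem pv_nodup_foldl_add (l : List String) (acc : PySem.Set String) (h : acc.Nodup) :
    (l.foldl PySem.Set.add acc).Nodup := by
  induction l generalizing acc with
  | nil => exact h
  | cons x xs ih => exact ih _ (PySem.Set.nodup_add acc x h)

theorem pv_nodup_step (succ : String → List String) (r : PySem.Set String) (_h : r.Nodup) :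
    (pvRStep succ r).Nodup := by
  have gen : ∀ (l : List String) (acc : PySem.Set String), acc.Nodup →
      (l.foldl (fun a k => (succ k).foldl PySem.Set.add a) acc).Nodup := by
    intro l
    induction l with
    | nil => exact fun _ hh => hh
    | cons x xs ih => exact fun acc hacc => ih _ (pv_nodup_foldl_add _ _ hacc)
  exact gen r _ (PySem.Set.nodup_ofList r)

theorem pv_mem_step (succ : String → List String) (x : String) (r : PySem.Set String) :
    x ∈ pvRStep succ r ↔ x ∈ r ∨ ∃ k ∈ r, x ∈ succ k := by
  have gen : ∀ (l : List String) (acc : PySem.Set String),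
      x ∈ l.foldl (fun a k => (succ k).foldl PySem.Set.add a) acc ↔
        x ∈ acc ∨ ∃ k ∈ l, x ∈ succ k := by
    intro l
    induction l with
    | nil => simp
    | cons y ys ih =>
      intro acc
      simp only [List.foldl_cons, ih, pv_mem_foldl_add, List.mem_cons]
      constructor
      · rintro ((h | h) | ⟨k, hk, hxk⟩)
        · exact Or.inl h
        · exact Or.inr ⟨y, Or.inl rfl, h⟩
        · exact Or.inr ⟨k, Or.inr hk, hxk⟩
      · rintro (h | ⟨k, (rfl | hk), hxk⟩)
        · exact Or.inl (Or.inl h)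
        · exact Or.inl (Or.inr hxk)
        · exact Or.inr ⟨k, hk, hxk⟩
  unfold pvRStep
  rw [gen, PySem.Set.mem_ofList]

theorem pv_step_eq_of_equal (succ : String → List String) (r : PySem.Set String) (h : r.Nodup)
    (heq : PySem.Set.equal (pvRStep succ r) r = true) : pvRStep succ r = r := by
  obtain ⟨t, ht⟩ := pv_step_append succ r
  rw [PySem.Set.ofList_eq_self_of_nodup r h] at ht
  have hnd2 : (pvRStep succ r).Nodup := pv_nodup_step succ r h
  have hmem := (PySem.Set.equal_iff _ _).mp heq
  rw [ht] at hnd2 hmem ⊢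
  have ht0 : t = [] := by
    cases t with
    | nil => rfl
    | cons a t' =>
      have ha : a ∈ r := (hmem a).mp (by simp)
      have hd := (List.nodup_append.mp hnd2).2.2
      exact absurd rfl (hd a ha a (by simp))
  rw [ht0, List.append_nil]

theorem pv_iter_fix (succ : String → List String) (n : Nat) (r : PySem.Set String)
    (h : pvRStep succ r = r) : pvRIter succ n r = r := by
  induction n with
  | zero => rfl
  | succ n ih =>
    show pvRIter succ n (pvRStep succ r) = r
    rw [h]; exact ih

theorem pv_bLoop_eq_iter (tree : PvTree) (n : Nat) (r : PySem.Set String) (h : r.Nodup) :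
    pvBLoop tree n r = pvRIter (pvSucc tree) n r := by
  induction n generalizing r with
  | zero => rfl
  | succ n ih =>
    show (if PySem.Set.equal (pvStep tree r) r = true then r else pvBLoop tree n (pvStep tree r)) =
      pvRIter (pvSucc tree) n (pvRStep (pvSucc tree) r)
    split_ifs with hq
    · have hfix := pv_step_eq_of_equal (pvSucc tree) r h hq
      rw [show pvStep tree r = pvRStep (pvSucc tree) r from rfl] at *
      rw [hfix, pv_iter_fix (pvSucc tree) n r hfix]
    · exact ih (pvStep tree r) (pv_nodup_step (pvSucc tree) r h)

theorem pv_iter_add (succ : String → List String) (m n : Nat) (r : PySem.Set String) :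
    pvRIter succ (m + n) r = pvRIter succ m (pvRIter succ n r) := by
  induction n generalizing r with
  | zero => rfl
  | succ n ih => exact ih (pvRStep succ r)

theorem pv_mem_iter_self (succ : String → List String) (n : Nat) (x : String) (r : PySem.Set String)
    (h : x ∈ r) : x ∈ pvRIter succ n r := by
  induction n generalizing r with
  | zero => exact h
  | succ n ih => exact ih (pvRStep succ r) ((pv_mem_step succ x r).mpr (Or.inl h))

theorem pv_mem_iter_mono (succ : String → List String) (m n : Nat) (x : String) (r : PySem.Set String)
    (hmn : m ≤ n) (h : x ∈ pvRIter succ m r) : x ∈ pvRIter succ n r := by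
  obtain ⟨k, rfl⟩ := Nat.exists_eq_add_of_le hmn
  rw [Nat.add_comm, pv_iter_add]
  exact pv_mem_iter_self succ k x _ h

theorem pv_iter_succ_step (succ : String → List String) (n : Nat) (r : PySem.Set String) :
    pvRIter succ (n + 1) r = pvRStep succ (pvRIter succ n r) := by
  induction n generalizing r with
  | zero => rfl
  | succ n ih =>
    show pvRIter succ (n + 1) (pvRStep succ r) = _
    rw [ih (pvRStep succ r)]
    rfl

theorem pv_chain_mem_iter (succ : String → List String) (l : List String) (hne : l ≠ [])
    (r : PySem.Set String) (hhead : l.head hne ∈ r)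
    (hchain : List.IsChain (fun a b => b ∈ succ a) l) :
    ∀ x ∈ l, x ∈ pvRIter succ (l.length - 1) r := by
  induction l generalizing r with
  | nil => exact absurd rfl hne
  | cons a l ih =>
    intro x hx
    cases l with
    | nil =>
      simp only [List.mem_singleton] at hx
      subst hx
      simpa using hhead
    | cons b t =>
      have hedge : b ∈ succ a := (List.isChain_cons_cons.mp hchain).1
      have hchain' := (List.isChain_cons_cons.mp hchain).2
      have hb : b ∈ pvRStep succ r :=
        (pv_mem_step succ b r).mpr (Or.inr ⟨a, by simpa using hhead, hedge⟩)
      rcases List.mem_cons.mp hx with rfl | hx'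
      · exact pv_mem_iter_self succ _ x r (by simpa using hhead)
      · have hrec := ih (by simp) (pvRStep succ r) (by simpa using hb) hchain' x hx'
        simp only [List.length_cons, Nat.add_sub_cancel] at hrec ⊢
        exact hrec

theorem pv_mem_nbhd (succ : String → List String) (x : String) (r : List String) :
    x ∈ pvNbhd succ r ↔ x ∈ r ∨ ∃ k ∈ r, x ∈ succ k := by
  unfold pvNbhd
  rw [PySem.List.mem_dedup]
  simp [List.mem_append, List.mem_flatMap]

theorem pv_reach_add (succ : String → List String) (m n : Nat) (r : List String) :
    pvReach succ (m + n) r = pvReach succ m (pvReach succ n r) := by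
  induction n generalizing r with
  | zero => rfl
  | succ n ih => exact ih (pvNbhd succ r)

theorem pv_mem_reach_self (succ : String → List String) (n : Nat) (x : String) (r : List String)
    (h : x ∈ r) : x ∈ pvReach succ n r := by
  induction n generalizing r with
  | zero => exact h
  | succ n ih => exact ih (pvNbhd succ r) ((pv_mem_nbhd succ x r).mpr (Or.inl h))

theorem pv_mem_reach_mono (succ : String → List String) (m n : Nat) (x : String) (r : List String)
    (hmn : m ≤ n) (h : x ∈ pvReach succ m r) : x ∈ pvReach succ n r := by
  obtain ⟨k, rfl⟩ := Nat.exists_eq_add_of_le hmn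
  rw [Nat.add_comm, pv_reach_add]
  exact pv_mem_reach_self succ k x _ h

theorem pv_chain_getLast_mem_reach (succ : String → List String) (l : List String) (hne : l ≠ [])
    (r : List String) (hhead : l.head hne ∈ r)
    (hchain : List.IsChain (fun a b => b ∈ succ a) l) :
    l.getLast hne ∈ pvReach succ (l.length - 1) r := by
  induction l generalizing r with
  | nil => exact absurd rfl hne
  | cons a l ih =>
    cases l with
    | nil => simpa using hhead
    | cons b t =>
      have hedge : b ∈ succ a := (List.isChain_cons_cons.mp hchain).1
      have hchain' := (List.isChain_cons_cons.mp hchain).2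
      have hb : b ∈ pvNbhd succ r :=
        (pv_mem_nbhd succ b r).mpr (Or.inr ⟨a, by simpa using hhead, hedge⟩)
      have hrec := ih (by simp) (pvNbhd succ r) (by simpa using hb) hchain'
      simp only [List.length_cons, Nat.add_sub_cancel] at hrec ⊢
      rw [List.getLast_cons (by simp)]
      exact hrec

theorem pv_mem_keys_of_succ (tree : PvTree) (x c : String) (h : c ∈ pvSucc tree x) :
    x ∈ tree.map Prod.fst := by
  unfold pvSucc at h
  cases hg : (PySem.Dict.mk tree).get? x with
  | none => rw [hg] at h; simp at h
  | some story =>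
    have hx : x ∈ (PySem.Dict.mk tree).keys := by
      by_contra hx
      rw [← PySem.Dict.get?_eq_none_iff_not_mem_keys] at hx
      rw [hx] at hg; simp at hg
    simpa [PySem.Dict.keys_mk] using hx

theorem pv_children_all (ch : List (String × Option String)) (g : String → Bool) :
    (ch.all fun p => match p.2 with | none => false | some c => g c)
      = ((ch.all fun p => p.2.isSome) && (ch.filterMap fun p => p.2).all g) := by
  induction ch with
  | nil => rfl
  | cons p ps ih =>
    cases h : p.2 with
    | none => simp [List.all_cons, h]
    | some c =>
      simp only [List.all_cons, h, List.filterMap_cons, Option.isSome_some, Bool.true_and, ih]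
      rw [Bool.and_left_comm]

theorem pv_go_succ (tree : PvTree) (f : Nat) (id : String) :
    is_deep_solved_go tree (f + 1) id =
      (pvGood tree id && (pvSucc tree id).all (is_deep_solved_go tree f)) := by
  show (match (PySem.Dict.mk tree).get? id with
    | none => false
    | some story =>
      if story.isEmpty then false
      else ((PySem.Dict.mk story).getD "children" []).all (fun p =>
        match p.2 with
        | none => false
        | some child_id => is_deep_solved_go tree f child_id)) = _
  unfold pvGood pvSucc
  cases hg : (PySem.Dict.mk tree).get? id with
  | none => rfl
  | some story =>
    by_cases he : story.isEmpty
    · simp [he]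
    · simp only [he, Bool.not_false, Bool.true_and]
      exact pv_children_all _ _

theorem pv_good_of_go (tree : PvTree) (f : Nat) (id : String)
    (h : is_deep_solved_go tree (f + 1) id = true) : pvGood tree id = true := by
  rw [pv_go_succ] at h
  exact Bool.and_elim_left h

theorem pv_forward (tree : PvTree) (m : Nat) (r : PySem.Set String)
    (h : ∀ x ∈ r, ∃ f, is_deep_solved_go tree (f + 1) x = true) :
    ∀ x ∈ pvRIter (pvSucc tree) m r, ∃ f, is_deep_solved_go tree (f + 1) x = true := by
  induction m generalizing r with
  | zero => exact h
  | succ m ih =>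
    intro x hx
    refine ih (pvRStep (pvSucc tree) r) ?_ x hx
    intro y hy
    rcases (pv_mem_step (pvSucc tree) y r).mp hy with hy' | ⟨k, hk, hyk⟩
    · exact h y hy'
    · obtain ⟨fk, hfk⟩ := h k hk
      rw [pv_go_succ] at hfk
      have hy2 := List.all_eq_true.mp (Bool.and_elim_right hfk) y hyk
      cases fk with
      | zero => exact absurd hy2 (by simp [is_deep_solved_go])
      | succ f' => exact ⟨f', hy2⟩

theorem pv_len_bound (tree : PvTree) (l : List String) (hnd : l.Nodup)
    (hkeys : ∀ x ∈ l.dropLast, x ∈ tree.map Prod.fst) :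
    l.length ≤ tree.length + 1 := by
  have h1 : l.dropLast.Nodup := hnd.sublist (List.dropLast_sublist l)
  have hsub : l.dropLast ⊆ PySem.List.dedup (tree.map Prod.fst) :=
    fun x hx => (PySem.List.mem_dedup _ _).mpr (hkeys x hx)
  have h2 := (List.subperm_of_subset h1 hsub).length_le
  have h3 : (PySem.List.dedup (tree.map Prod.fst)).length ≤ (tree.map Prod.fst).length := by
    rw [PySem.List.dedup_eq_ofList]
    exact PySem.Set.length_ofList_le _
  have h4 : l.dropLast.length = l.length - 1 := List.length_dropLast
  have h5 : (tree.map Prod.fst).length = tree.length := List.length_map _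
  omega

theorem pv_ok_of_good (tree : PvTree) (k : String) (h : pvGood tree k = true) :
    pvOk tree k = true := by
  unfold pvGood at h
  unfold pvOk
  cases hg : (PySem.Dict.mk tree).get? k with
  | none => rw [hg] at h; exact Bool.noConfusion h
  | some story =>
    rw [hg] at h
    have h' : (!story.isEmpty && ((PySem.Dict.mk story).getD "children" []).all (fun p => p.2.isSome)) = true := h
    exact Bool.and_elim_left h'

theorem pv_takeWhile_eq_self {α : Type} (p : α → Bool) (l : List α) (h : ∀ x ∈ l, p x = true) :
    l.takeWhile p = l := by
  induction l with
  | nil => rfl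
  | cons a t ih =>
    have ha := h a (by simp)
    simp [ha, ih (fun x hx => h x (by simp [hx]))]

theorem pv_findIdx?_none {α : Type} (p : α → Bool) (l : List α) (h : ∀ x ∈ l, p x = false) :
    l.findIdx? p = none := by
  rw [List.findIdx?_eq_none_iff]
  exact h

theorem pv_succR_eq_succ (tree : PvTree) (k : String) (hk : pvGood tree k = true)
    (hch : ∀ c ∈ pvSucc tree k, pvGood tree c = true) :
    pvSuccR tree k = pvSucc tree k := by
  cases hg : (PySem.Dict.mk tree).get? k with
  | none =>
    exfalso
    unfold pvGood at hk
    rw [hg] at hk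
    exact Bool.noConfusion hk
  | some story =>
    unfold pvGood at hk
    rw [hg] at hk
    have hk' : (!story.isEmpty && ((PySem.Dict.mk story).getD "children" []).all (fun p => p.2.isSome)) = true := hk
    have he : story.isEmpty = false := by
      cases h' : story.isEmpty
      · rfl
      · rw [h'] at hk'; exact Bool.noConfusion (Bool.and_elim_left hk')
    have hch' : ∀ c ∈ ((PySem.Dict.mk story).getD "children" []).filterMap (fun p => p.2), pvGood tree c = true := by
      intro c hc
      apply hch
      unfold pvSucc
      rw [hg]
      simp only [he, Bool.false_eq_true, if_false]
      exact hc
    unfold pvSuccR pvSucc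
    rw [hg]
    simp only [he, Bool.false_eq_true, if_false]
    have hall : ∀ p ∈ (PySem.Dict.mk story).getD "children" [], (fun (p : String × Option String) => p.2.isSome) p = true :=
      fun p hp => List.all_eq_true.mp (Bool.and_elim_right hk') p hp
    rw [pv_takeWhile_eq_self _ _ hall]
    have hnone : (((PySem.Dict.mk story).getD "children" []).filterMap (fun p => p.2)).findIdx?
        (fun c => !(pvOk tree c)) = none := by
      apply pv_findIdx?_none
      intro c hc
      have := pv_ok_of_good tree c (hch' c hc)
      simp [this]
    simp only [hnone]

theorem pv_chain_imp {R S : String → String → Prop} (P : String → Prop) (l : List String)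
    (h : List.IsChain R l) (hP : ∀ a ∈ l, P a) (himp : ∀ a b, P a → R a b → S a b) :
    List.IsChain S l := by
  induction l with
  | nil => exact List.isChain_nil
  | cons a t ih =>
    cases t with
    | nil => exact List.isChain_singleton a
    | cons b t' =>
      have h' := List.isChain_cons_cons.mp h
      exact List.isChain_cons_cons.mpr
        ⟨himp a b (hP a (by simp)) h'.1, ih h'.2 (fun x hx => hP x (by simp [hx]))⟩

theorem pv_backward (tree : PvTree) (sid : String)
    (hpre : Pre_is_deep_solved sid tree)
    (hgood : ∀ k ∈ pvRIter (pvSucc tree) (tree.length + 1) (PySem.Set.ofList [sid]), pvGood tree k = true) :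
    ∀ (f : Nat) (l : List String) (hne : l ≠ []),
      l.head hne = sid →
      List.IsChain (fun a b => b ∈ pvSucc tree a) l →
      l.Nodup →
      (∀ x ∈ l.dropLast, x ∈ tree.map Prod.fst) →
      tree.length + 2 ≤ f + l.length →
      is_deep_solved_go tree f (l.getLast hne) = true := by
  intro f
  induction f with
  | zero =>
    intro l hne hhead hchain hnd hkeys hfuel
    have := pv_len_bound tree l hnd hkeys
    omega
  | succ f ih =>
    intro l hne hhead hchain hnd hkeys hfuel
    have hlen := pv_len_bound tree l hnd hkeys
    have hheadm : l.head hne ∈ PySem.Set.ofList [sid] := by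
      rw [hhead, PySem.Set.mem_ofList]; simp
    -- every node of the path, and every pvSucc-child of a node of the path, lies in B's closure
    have hmeml : ∀ x ∈ l, x ∈ pvRIter (pvSucc tree) (tree.length + 1) (PySem.Set.ofList [sid]) := by
      intro x hx
      exact pv_mem_iter_mono (pvSucc tree) (l.length - 1) _ x _ (by omega)
        (pv_chain_mem_iter (pvSucc tree) l hne _ hheadm hchain x hx)
    have hmemch : ∀ x ∈ l, ∀ c ∈ pvSucc tree x,
        c ∈ pvRIter (pvSucc tree) (tree.length + 1) (PySem.Set.ofList [sid]) := by
      intro x hx c hc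
      have hx1 := pv_chain_mem_iter (pvSucc tree) l hne _ hheadm hchain x hx
      have hc1 : c ∈ pvRIter (pvSucc tree) (l.length - 1 + 1) (PySem.Set.ofList [sid]) := by
        rw [pv_iter_succ_step]
        exact (pv_mem_step (pvSucc tree) c _).mpr (Or.inr ⟨x, hx1, hc⟩)
      exact pv_mem_iter_mono (pvSucc tree) (l.length - 1 + 1) _ c _ (by omega) hc1
    have hPl : ∀ a ∈ l, pvGood tree a = true ∧ ∀ c ∈ pvSucc tree a, pvGood tree c = true :=
      fun a ha => ⟨hgood a (hmeml a ha), fun c hc => hgood c (hmemch a ha c hc)⟩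
    have hsuccRl : ∀ a ∈ l, pvSuccR tree a = pvSucc tree a :=
      fun a ha => pv_succR_eq_succ tree a (hPl a ha).1 (hPl a ha).2
    have hchainR : List.IsChain (fun a b => b ∈ pvSuccR tree a) l :=
      pv_chain_imp (fun a => a ∈ l) l hchain (fun a ha => ha)
        (fun a b ha hr => by rw [hsuccRl a ha]; exact hr)
    have hidR : l.getLast hne ∈ pvRIter (pvSucc tree) (tree.length + 1) (PySem.Set.ofList [sid]) :=
      hmeml _ (List.getLast_mem hne)
    rw [pv_go_succ, hgood _ hidR, Bool.true_and]
    apply List.all_eq_true.mpr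
    intro c hc
    have hidkeys : l.getLast hne ∈ tree.map Prod.fst := pv_mem_keys_of_succ tree _ c hc
    have hcR : c ∈ pvSuccR tree (l.getLast hne) := by
      rw [hsuccRl _ (List.getLast_mem hne)]; exact hc
    have hcl : c ∉ l := by
      intro hcmem
      obtain ⟨l₁, l₂, hsplit⟩ := List.append_of_mem hcmem
      have hchain2R : List.IsChain (fun a b => b ∈ pvSuccR tree a) (c :: l₂) := by
        rw [hsplit] at hchainR
        exact (List.isChain_append.mp hchainR).2.1
      have hlast : l.getLast hne = (c :: l₂).getLast (by simp) := by
        rw [List.getLast_congr hne (by simp : l₁ ++ c :: l₂ ≠ []) hsplit]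
        exact List.getLast_append_of_ne_nil _ (by simp)
      -- use Pre_ at c: c is reachable from sid and lies on a steppable cycle
      have hcRR : c ∈ pvReach (pvSuccR tree) (tree.length + 1) [sid] := by
        cases l₁ with
        | nil =>
          have h1 : l.head? = some c := by rw [hsplit]; rfl
          rw [List.head?_eq_some_head hne, hhead] at h1
          have hcs : c = sid := (Option.some.inj h1).symm
          exact pv_mem_reach_self (pvSuccR tree) _ c _ (by simp [hcs])
        | cons a l₁' =>
          have hsp2 := List.isChain_append.mp (hsplit ▸ hchainR)
          have hch4 : List.IsChain (fun a b => b ∈ pvSuccR tree a) ((a :: l₁') ++ [c]) := by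
            apply List.isChain_append.mpr
            refine ⟨hsp2.1, by simp, ?_⟩
            intro x hx y hy
            simp only [List.head?_cons, Option.mem_some_iff] at hy
            exact hy ▸ hsp2.2.2 x hx c (by simp)
          have hh4 : ((a :: l₁') ++ [c]).head (by simp) ∈ [sid] := by
            have h1 : l.head? = some a := by rw [hsplit]; rfl
            rw [List.head?_eq_some_head hne, hhead] at h1
            have h2 : sid = a := Option.some.inj h1
            simp [← h2]
          have hm4 := pv_chain_getLast_mem_reach (pvSuccR tree) ((a :: l₁') ++ [c]) (by simp) _ hh4 hch4
          rw [List.getLast_concat] at hm4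
          have hll : l.length = l₁'.length + 1 + (l₂.length + 1) := by
            rw [hsplit]; simp; omega
          refine pv_mem_reach_mono (pvSuccR tree) _ _ _ _ ?_ hm4
          simp only [List.length_append, List.length_cons, List.length_nil]
          omega
      have hmemc : c ∈ pvReach (pvSuccR tree) (tree.length + 1) (pvSuccR tree c) := by
        cases l₂ with
        | nil =>
          -- self loop: c ∈ pvSuccR c
          have hcc : c ∈ pvSuccR tree c := by
            have hlc : l.getLast hne = c := by simpa using hlast
            rw [← hlc]
            exact hlc ▸ hcR
          exact pv_mem_reach_self (pvSuccR tree) _ c _ hcc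
        | cons z t =>
          have hez : z ∈ pvSuccR tree c := (List.isChain_cons_cons.mp hchain2R).1
          -- chain z :: t ++ [c]
          have hch3 : List.IsChain (fun a b => b ∈ pvSuccR tree a) ((z :: t) ++ [c]) := by
            apply List.isChain_append.mpr
            refine ⟨(List.isChain_cons_cons.mp hchain2R).2, by simp, ?_⟩
            intro x hx y hy
            simp only [List.head?_cons, Option.mem_some_iff] at hy
            rw [List.getLast?_eq_some_getLast (by simp : z :: t ≠ ([] : List String)), Option.mem_some_iff] at hx
            have hx2 : l.getLast hne = x := by
              rw [hlast, List.getLast_cons (by simp)]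
              exact hx
            rw [← hx2, ← hy]
            exact hcR
          have hh : ((z :: t) ++ [c]).head (by simp) ∈ pvSuccR tree c := by
            simpa using hez
          have hm := pv_chain_getLast_mem_reach (pvSuccR tree) ((z :: t) ++ [c]) (by simp) _ hh hch3
          rw [List.getLast_concat] at hm
          refine pv_mem_reach_mono (pvSuccR tree) _ _ _ _ ?_ hm
          -- l = l₁ ++ c :: z :: t so l.length ≥ t.length + 2
          have hll : l.length = l₁.length + (t.length + 2) := by
            rw [hsplit]; simp [Nat.add_assoc]
          simp only [List.length_append, List.length_cons, List.length_nil]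
          omega
      exact hpre c hcRR hmemc
    -- apply the induction hypothesis to the extended path l ++ [c]
    have happ : l ++ [c] ≠ [] := by simp
    have hres := ih (l ++ [c]) happ ?_ ?_ ?_ ?_ ?_
    · rwa [List.getLast_concat] at hres
    · rw [List.head_append]
      rw [dif_neg (by simpa using hne)]
      exact hhead
    · apply List.isChain_append.mpr
      refine ⟨hchain, by simp, ?_⟩
      intro x hx y hy
      simp only [List.head?_cons, Option.mem_some_iff] at hy
      rw [List.getLast?_eq_some_getLast hne, Option.mem_some_iff] at hx
      rw [← hx, ← hy]
      exact hc
    · rw [List.nodup_append]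
      exact ⟨hnd, by simp, fun a ha b hb => by
        simp only [List.mem_singleton] at hb
        subst hb
        exact fun h => hcl (h ▸ ha)⟩
    · intro x hx
      rw [List.dropLast_concat] at hx
      rcases List.mem_append.mp ((List.dropLast_append_getLast hne) ▸ hx) with hx' | hx'
      · exact hkeys x hx'
      · simp only [List.mem_singleton] at hx'
        exact hx' ▸ hidkeys
    · simp only [List.length_append, List.length_singleton]
      omega

-- ===== VERDICT (by name: the statement is the Claim_ definition above) =====
theorem is_deep_solved_spec : Claim_equal_is_deep_solved := by
  intro sid tree _hdom hpre
  unfold Spec_is_deep_solved is_deep_solved is_deep_solved_alt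
  rw [pv_bLoop_eq_iter tree _ _ (PySem.Set.nodup_ofList _)]
  cases hB : (pvRIter (pvSucc tree) (tree.length + 1) (PySem.Set.ofList [sid])).all (pvGood tree) with
  | true =>
    have hgood := List.all_eq_true.mp hB
    have hres := pv_backward tree sid hpre hgood (tree.length + 2) [sid] (by simp) rfl
      (by simp) (by simp) (by simp) (by simp)
    simpa using hres
  | false =>
    cases hx : is_deep_solved_go tree (tree.length + 2) sid with
    | false => rfl
    | true =>
      exfalso
      have hall : ∀ x ∈ pvRIter (pvSucc tree) (tree.length + 1) (PySem.Set.ofList [sid]),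
          ∃ f, is_deep_solved_go tree (f + 1) x = true := by
        apply pv_forward
        intro x hxm
        have hxs : x = sid := by
          rw [PySem.Set.mem_ofList] at hxm
          simpa using hxm
        exact hxs ▸ ⟨tree.length + 1, hx⟩
      have hgood : ∀ k ∈ pvRIter (pvSucc tree) (tree.length + 1) (PySem.Set.ofList [sid]),
          pvGood tree k = true := fun k hk => by
        obtain ⟨f, hf⟩ := hall k hk
        exact pv_good_of_go tree f k hf
      rw [List.all_eq_true.mpr hgood] at hB
      exact Bool.noConfusion hB
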